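-- pv_equiv track=rewrite | github.com/wiv33/A-Learning-python | practice_algorithm/programmers/schools/03/dp/n.py | solution
-- ===== SOURCE A (Python) =====
-- def solution(N, number):
--     answer = 0
--     elements = [{int(str(N) * x)} for x in range(1, 9)]
--
--     for i in range(8):
--         for j in range(i):
--             for op1 in elements[j]:
--                 for op2 in elements[i - j - 1]:
--                     elements[i].add(op1 + op2)
--                     elements[i].add(op1 - op2)
--                     elements[i].add(op1 * op2)
--                     if op2 != 0:
--                         elements[i].add(op1 // op2)
--         if number in elements[i]:
--             answer = i + 1
--             break
--         else:
--             answer = -1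
--
--     return answer
-- ===== SOURCE B (Python) =====
-- def solution(N, number):
--     memo = {}
--
--     def add_ops(vals, xs, ys):
--         for x in xs:
--             for y in ys:
--                 vals |= {x + y, x - y, x * y}
--                 if y != 0:
--                     vals.add(x // y)
--         return vals
--
--     def reachable(k):
--         if k in memo:
--             return memo[k]
--         vals = {int(str(N) * k)}
--         for a in range(1, k // 2 + 1):
--             lo, hi = reachable(a), reachable(k - a)
--             vals = add_ops(vals, lo, hi)
--             vals = add_ops(vals, hi, lo)
--         memo[k] = vals
--         return vals
--
--     for count in range(1, 9):
--         if number in reachable(count):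
--             return count
--     return -1
-- ===== Notes on version B (the rewrite author's own statement) =====
-- stated objective: alternative
-- what changed: Replaces A's in-place mutation of an 8-slot array of sets (triple nested loop over all splits j) by a top-down memoized recursion reachable(k) with a combine() helper that visits only splits a <= k//2 and unions both orientations, returning the first count in 1..8 that contains the number.
-- outside the precondition, e.g. on solution(-1, 5): A raises ValueError, B raises ValueError
-- crash fix: A raises ValueError for every N < 0 (int('-2-2') while building the comprehension); B returns 1 there when number = N, since count 1 succeeds before any concatenation is parsed. — e.g. on solution(-1, -1): A raises ValueError, B returns 1
import Mathlib
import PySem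

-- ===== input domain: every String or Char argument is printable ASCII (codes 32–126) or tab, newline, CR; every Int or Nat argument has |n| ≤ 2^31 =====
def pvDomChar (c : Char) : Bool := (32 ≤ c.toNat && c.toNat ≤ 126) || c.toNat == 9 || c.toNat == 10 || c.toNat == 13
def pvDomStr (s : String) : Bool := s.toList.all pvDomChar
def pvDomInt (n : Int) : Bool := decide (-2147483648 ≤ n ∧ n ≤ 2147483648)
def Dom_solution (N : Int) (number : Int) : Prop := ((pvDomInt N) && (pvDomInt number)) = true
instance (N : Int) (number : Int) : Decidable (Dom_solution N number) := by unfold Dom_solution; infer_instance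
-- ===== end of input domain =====

-- B re-implements the same N-count search as top-down memoized recursion over the use-count k,
-- combining only the splits a <= k//2 in both orientations (objective: alternative decomposition, not speed).
-- Python sets are ported as Std.HashSet Int (only membership is consumed, never iteration order).

-- int(str(N) * k), shared by both sources; total form via .getD 0, exact under Pre_ (0 ≤ N)
def pyRepInt (N : Int) (k : Int) : Int :=
  (PySem.Int.ofChars? (List.flatten (List.replicate k.toNat (PySem.Int.toChars N)))).getD 0

-- ===== PORT A =====
-- the three adds + conditional floor-division add of A's innermost loop body, accumulated into elements[i]
def stepA (elems : List (Std.HashSet Int)) (i : Nat) : Std.HashSet Int :=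
  (List.range i).foldl (fun s j =>
    (elems.getD j ∅).fold (fun s op1 =>
      (elems.getD (i - j - 1) ∅).fold (fun s op2 =>
        let s := s.insert (op1 + op2)
        let s := s.insert (op1 - op2)
        let s := s.insert (op1 * op2)
        if op2 ≠ 0 then s.insert (PySem.Int.floordiv op1 op2) else s) s) s)
    (elems.getD i ∅)

-- for i in range(8): mutate elements[i], test membership, break with answer = i+1 or set answer = -1
def runA (number : Int) : List Nat → List (Std.HashSet Int) → Int → Int
  | [], _, answer => answer
  | i :: rest, elems, _ =>
    let elems' := elems.set i (stepA elems i)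
    if number ∈ elems'.getD i ∅ then ((i : Int) + 1) else runA number rest elems' (-1)

def solution (N : Int) (number : Int) : Int :=
  runA number (List.range 8)
    ((PySem.List.pyRange 1 9 1).map (fun x => (∅ : Std.HashSet Int).insert (pyRepInt N x))) 0

-- ===== PORT B =====
-- add_ops(vals, xs, ys): vals |= {x+y, x-y, x*y} for each pair, plus x//y when y != 0
def addOps (vals xs ys : Std.HashSet Int) : Std.HashSet Int :=
  xs.fold (fun vals x =>
    ys.fold (fun vals y =>
      let vals := vals.insertMany [x + y, x - y, x * y]
      if y ≠ 0 then vals.insert (PySem.Int.floordiv x y) else vals) vals) vals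

-- reachable(k): values using N exactly k times; the memo dict is threaded explicitly
def reachB (N : Int) (k : Nat) (memo : PySem.Dict Nat (Std.HashSet Int)) :
    Std.HashSet Int × PySem.Dict Nat (Std.HashSet Int) :=
  match memo.get? k with
  | some s => (s, memo)
  | none =>
    let r := (List.range' 1 (k / 2)).attach.foldl
      (fun (p : Std.HashSet Int × PySem.Dict Nat (Std.HashSet Int)) a =>
        let lo := reachB N a.1 p.2
        let hi := reachB N (k - a.1) lo.2
        (addOps (addOps p.1 lo.1 hi.1) hi.1 lo.1, hi.2))
      ((∅ : Std.HashSet Int).insert (pyRepInt N (k : Int)), memo)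
    (r.1, r.2.insert k r.1)
termination_by k
decreasing_by
  all_goals (have := List.mem_range'_1.mp a.2; omega)

-- for count in range(1, 9): return the first count with number in reachable(count); else -1
def findB (N number : Int) : List Nat → PySem.Dict Nat (Std.HashSet Int) → Int
  | [], _ => -1
  | c :: rest, memo =>
    let r := reachB N c memo
    if number ∈ r.1 then (c : Int) else findB N number rest r.2

def solution_alt (N : Int) (number : Int) : Int :=
  findB N number (List.range' 1 8) PySem.Dict.empty

-- ===== PRECONDITION & SPEC =====
-- Pre_ excludes N < 0, where A's list comprehension raises ValueError (int("-2-2") at x = 2).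
def Pre_solution (N : Int) (number : Int) : Prop := 0 ≤ N
instance (N : Int) (number : Int) : Decidable (Pre_solution N number) := by unfold Pre_solution; infer_instance
def pvWitness_solution : Int × Int := (5, 12)

-- A raises ValueError for every N < 0; B returns 1 there when number = N, since count 1 succeeds before any concatenation is parsed.
def Raises_solution (N : Int) (number : Int) : Prop := N < 0 ∧ number = N
instance (N : Int) (number : Int) : Decidable (Raises_solution N number) := by unfold Raises_solution; infer_instance
def pvRaiseWitness_solution : Int × Int := (-1, -1)
def pvRaiseWitnessOut_solution : Int := 1

def Spec_solution (N : Int) (number : Int) (out : Int) : Prop := out = solution_alt N number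
instance (N : Int) (number : Int) (out : Int) : Decidable (Spec_solution N number out) := by unfold Spec_solution; infer_instance

-- ===== CLAIM (what is proved, stated in full; the proofs are below) =====
def Claim_equal_solution : Prop := ∀ (N : Int) (number : Int), Dom_solution N number → Pre_solution N number → Spec_solution N number (solution N number)
def Claim_raises_solution : Prop := (∀ (N : Int) (number : Int), Dom_solution N number → Raises_solution N number → ¬ Pre_solution N number) ∧ (Dom_solution (pvRaiseWitness_solution.1) (pvRaiseWitness_solution.2) ∧ Raises_solution (pvRaiseWitness_solution.1) (pvRaiseWitness_solution.2) ∧ solution_alt (pvRaiseWitness_solution.1) (pvRaiseWitness_solution.2) = pvRaiseWitnessOut_solution)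

-- ===== LEMMAS AND PROOFS =====

-- the list of results one (op1, op2) pair contributes
def opsL (x y : Int) : List Int :=
  if y = 0 then [x + y, x - y, x * y] else [x + y, x - y, x * y, PySem.Int.floordiv x y]

set_option maxRecDepth 8192

lemma mem_insert_empty (v w : Int) : v ∈ (∅ : Std.HashSet Int).insert w ↔ v = w := by
  constructor
  · intro h
    rcases Std.HashSet.mem_insert.mp h with h | h
    · exact (beq_iff_eq.mp h).symm
    · exact absurd h Std.HashSet.not_mem_empty
  · intro h
    exact Std.HashSet.mem_insert.mpr (Or.inl (beq_iff_eq.mpr h.symm))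

lemma foldl_acc_prop {alpha S : Type} (Q : S → Prop) (g : S → alpha → S) (P : alpha → Prop)
    (h : ∀ s e, Q (g s e) ↔ Q s ∨ P e) :
    ∀ (l : List alpha) (s0 : S), Q (l.foldl g s0) ↔ Q s0 ∨ ∃ e ∈ l, P e := by
  intro l
  induction l with
  | nil => simp
  | cons e l ih =>
    intro s0
    rw [List.foldl_cons, ih, h, List.exists_mem_cons_iff]
    tauto

-- ---- membership characterisation of port A's nested loops ----

lemma mem_innerA (v x y : Int) (s : Std.HashSet Int) :
    v ∈ (let s := s.insert (x + y)
         let s := s.insert (x - y)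
         let s := s.insert (x * y)
         if y ≠ 0 then s.insert (PySem.Int.floordiv x y) else s) ↔ v ∈ s ∨ v ∈ opsL x y := by
  by_cases hy : y = 0 <;> simp [opsL, hy, Std.HashSet.mem_insert] <;> tauto

lemma mem_foldA1 (v x : Int) (ys : Std.HashSet Int) (s : Std.HashSet Int) :
    v ∈ ys.fold (fun s op2 =>
        let s := s.insert (x + op2)
        let s := s.insert (x - op2)
        let s := s.insert (x * op2)
        if op2 ≠ 0 then s.insert (PySem.Int.floordiv x op2) else s) s
      ↔ v ∈ s ∨ ∃ y ∈ ys, v ∈ opsL x y := by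
  rw [Std.HashSet.fold_eq_foldl_toList]
  refine Iff.trans (foldl_acc_prop (fun s => v ∈ s) _ (fun y => v ∈ opsL x y)
    (fun s' y => mem_innerA v x y s') _ _) ?_
  simp [Std.HashSet.mem_toList]

lemma mem_foldA2 (v : Int) (xs ys : Std.HashSet Int) (s : Std.HashSet Int) :
    v ∈ xs.fold (fun s op1 =>
        ys.fold (fun s op2 =>
          let s := s.insert (op1 + op2)
          let s := s.insert (op1 - op2)
          let s := s.insert (op1 * op2)
          if op2 ≠ 0 then s.insert (PySem.Int.floordiv op1 op2) else s) s) s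
      ↔ v ∈ s ∨ ∃ x ∈ xs, ∃ y ∈ ys, v ∈ opsL x y := by
  rw [Std.HashSet.fold_eq_foldl_toList]
  refine Iff.trans (foldl_acc_prop (fun s => v ∈ s) _ (fun x => ∃ y ∈ ys, v ∈ opsL x y)
    (fun s' x => mem_foldA1 v x ys s') _ _) ?_
  simp [Std.HashSet.mem_toList]

lemma mem_stepA (elems : List (Std.HashSet Int)) (i : Nat) (v : Int) :
    v ∈ stepA elems i ↔ v ∈ elems.getD i ∅ ∨
      ∃ j ∈ List.range i, ∃ x ∈ elems.getD j ∅, ∃ y ∈ elems.getD (i - j - 1) ∅, v ∈ opsL x y := by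
  unfold stepA
  refine foldl_acc_prop (fun s => v ∈ s) _ _ ?_ _ _
  intro s j
  exact mem_foldA2 v _ _ s

-- ---- membership characterisation of port B's add_ops ----

lemma mem_innerB (v x y : Int) (vals : Std.HashSet Int) :
    v ∈ (let vals := vals.insertMany [x + y, x - y, x * y]
         if y ≠ 0 then vals.insert (PySem.Int.floordiv x y) else vals) ↔ v ∈ vals ∨ v ∈ opsL x y := by
  by_cases hy : y = 0 <;>
    simp [opsL, hy, Std.HashSet.mem_insert, Std.HashSet.mem_insertMany_list] <;> tauto

lemma mem_foldB1 (v x : Int) (ys : Std.HashSet Int) (s : Std.HashSet Int) :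
    v ∈ ys.fold (fun vals y =>
        let vals := vals.insertMany [x + y, x - y, x * y]
        if y ≠ 0 then vals.insert (PySem.Int.floordiv x y) else vals) s
      ↔ v ∈ s ∨ ∃ y ∈ ys, v ∈ opsL x y := by
  rw [Std.HashSet.fold_eq_foldl_toList]
  refine Iff.trans (foldl_acc_prop (fun s => v ∈ s) _ (fun y => v ∈ opsL x y)
    (fun s' y => mem_innerB v x y s') _ _) ?_
  simp [Std.HashSet.mem_toList]

lemma mem_addOps (vals xs ys : Std.HashSet Int) (v : Int) :
    v ∈ addOps vals xs ys ↔ v ∈ vals ∨ ∃ x ∈ xs, ∃ y ∈ ys, v ∈ opsL x y := by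
  unfold addOps
  rw [Std.HashSet.fold_eq_foldl_toList]
  refine Iff.trans (foldl_acc_prop (fun s => v ∈ s) _ (fun x => ∃ y ∈ ys, v ∈ opsL x y)
    (fun s' x => mem_foldB1 v x ys s') _ _) ?_
  simp [Std.HashSet.mem_toList]

-- ---- the pure (memo-free, list-set) reachable-set specification used to relate the two ports ----

def combineP (xs ys : PySem.Set Int) : PySem.Set Int :=
  xs.foldl (fun out x =>
    ys.foldl (fun out y =>
      let out := PySem.Set.update out [x + y, x - y, x * y]
      if y ≠ 0 then PySem.Set.add out (PySem.Int.floordiv x y) else out) out) PySem.Set.empty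

def reachP (N : Int) (k : Nat) : PySem.Set Int :=
  (List.range' 1 (k / 2)).attach.foldl
    (fun vals a =>
      PySem.Set.union vals
        (PySem.Set.union (combineP (reachP N a.1) (reachP N (k - a.1)))
                         (combineP (reachP N (k - a.1)) (reachP N a.1))))
    [pyRepInt N (k : Int)]
termination_by k
decreasing_by
  all_goals (have := List.mem_range'_1.mp a.2; omega)

lemma mem_innerP (v x y : Int) (out : PySem.Set Int) :
    v ∈ (let out := PySem.Set.update out [x + y, x - y, x * y]
         if y ≠ 0 then PySem.Set.add out (PySem.Int.floordiv x y) else out) ↔ v ∈ out ∨ v ∈ opsL x y := by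
  by_cases hy : y = 0 <;>
    simp [opsL, hy, PySem.Set.mem_add] <;> tauto

lemma mem_combineP (xs ys : PySem.Set Int) (v : Int) :
    v ∈ combineP xs ys ↔ ∃ x ∈ xs, ∃ y ∈ ys, v ∈ opsL x y := by
  unfold combineP
  refine Iff.trans (foldl_acc_prop (fun s => v ∈ s) _ (fun x => ∃ y ∈ ys, v ∈ opsL x y) ?_ xs PySem.Set.empty) ?_
  · intro s x
    refine foldl_acc_prop (fun s => v ∈ s) _ _ ?_ _ _
    intro s' y
    exact mem_innerP v x y s'
  · simp [PySem.Set.empty]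

lemma mem_reachP (N : Int) (k : Nat) (v : Int) :
    v ∈ reachP N k ↔ v = pyRepInt N (k : Int) ∨
      ∃ a ∈ List.range' 1 (k / 2),
        (∃ x ∈ reachP N a, ∃ y ∈ reachP N (k - a), v ∈ opsL x y) ∨
        (∃ x ∈ reachP N (k - a), ∃ y ∈ reachP N a, v ∈ opsL x y) := by
  rw [reachP]
  refine Iff.trans (foldl_acc_prop (fun s => v ∈ s) _
      (fun (e : {x // x ∈ List.range' 1 (k / 2)}) =>
        (∃ x ∈ reachP N e.1, ∃ y ∈ reachP N (k - e.1), v ∈ opsL x y) ∨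
        (∃ x ∈ reachP N (k - e.1), ∃ y ∈ reachP N e.1, v ∈ opsL x y)) ?_ _ _) ?_
  · intro s e
    simp [PySem.Set.mem_union, mem_combineP]
  · constructor
    · rintro (hb | ⟨⟨a, ha⟩, -, hp⟩)
      · left; simpa using hb
      · exact Or.inr ⟨a, ha, hp⟩
    · rintro (hb | ⟨a, ha, hp⟩)
      · left; simpa using hb
      · exact Or.inr ⟨⟨a, ha⟩, List.mem_attach _ _, hp⟩

-- ---- port A's loop state ----

def elements0 (N : Int) : List (Std.HashSet Int) :=
  (PySem.List.pyRange 1 9 1).map (fun x => (∅ : Std.HashSet Int).insert (pyRepInt N x))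

def elemsA (N : Int) (t : Nat) : List (Std.HashSet Int) :=
  (List.range t).foldl (fun e i => e.set i (stepA e i)) (elements0 N)

def finalA (N : Int) (i : Nat) : Std.HashSet Int := stepA (elemsA N i) i

lemma elemsA_succ (N : Int) (t : Nat) :
    elemsA N (t + 1) = (elemsA N t).set t (stepA (elemsA N t) t) := by
  simp [elemsA, List.range_succ]

lemma pyRange19 : PySem.List.pyRange 1 9 1 = [1, 2, 3, 4, 5, 6, 7, 8] := by decide

lemma length_elemsA (N : Int) (t : Nat) : (elemsA N t).length = 8 := by
  induction t with
  | zero => simp [elemsA, elements0, pyRange19]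
  | succ t ih => rw [elemsA_succ]; simp [ih]

lemma elemsA_getD_ge (N : Int) : ∀ (t i : Nat), t ≤ i →
    (elemsA N t).getD i ∅ = (elements0 N).getD i ∅ := by
  intro t
  induction t with
  | zero => intro i _; rfl
  | succ t ih =>
    intro i h
    rw [elemsA_succ, List.getD_eq_getElem?_getD, List.getElem?_set_ne (by omega : t ≠ i),
      ← List.getD_eq_getElem?_getD]
    exact ih i (by omega)

lemma elements0_getD (N : Int) (i : Nat) (h : i < 8) :
    (elements0 N).getD i ∅ = (∅ : Std.HashSet Int).insert (pyRepInt N ((i : Int) + 1)) := by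
  interval_cases i <;> norm_num [elements0, pyRange19, List.getD]

lemma elemsA_getD_lt (N : Int) : ∀ (t i : Nat), i < t → t ≤ 8 →
    (elemsA N t).getD i ∅ = finalA N i := by
  intro t
  induction t with
  | zero => intro i h _; exact absurd h (Nat.not_lt_zero i)
  | succ t ih =>
    intro i h h8
    rw [elemsA_succ]
    by_cases hit : i = t
    · subst hit
      rw [List.getD_eq_getElem?_getD, List.getElem?_set_self (by rw [length_elemsA]; omega)]
      rfl
    · rw [List.getD_eq_getElem?_getD, List.getElem?_set_ne (fun hh => hit hh.symm),
        ← List.getD_eq_getElem?_getD]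
      exact ih i (by omega) (by omega)

-- ---- port A's final set at index k-1 has the membership of reachable(k) ----

lemma bridge (N : Int) : ∀ k, 1 ≤ k → k ≤ 8 → ∀ v,
    (v ∈ finalA N (k - 1) ↔ v ∈ reachP N k) := by
  intro k
  induction k using Nat.strong_induction_on with
  | _ k IH =>
  intro h1 h8 v
  have hbase : (elemsA N (k - 1)).getD (k - 1) ∅ = (∅ : Std.HashSet Int).insert (pyRepInt N (k : Int)) := by
    rw [elemsA_getD_ge N (k - 1) (k - 1) le_rfl, elements0_getD N (k - 1) (by omega)]
    congr 2
    omega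
  have hsrc : ∀ j, j < k - 1 → ∀ x,
      (x ∈ (elemsA N (k - 1)).getD j ∅ ↔ x ∈ reachP N (j + 1)) := by
    intro j hj x
    rw [elemsA_getD_lt N (k - 1) j hj (by omega)]
    have := IH (j + 1) (by omega) (by omega) (by omega) x
    simpa using this
  rw [finalA, mem_stepA, hbase]
  constructor
  · rintro (hb | ⟨j, hjm, x, hx, y, hy, hop⟩)
    · rw [mem_reachP]; left
      exact (mem_insert_empty v _).mp hb
    · have hj : j < k - 1 := List.mem_range.mp hjm
      rw [hsrc j hj] at hx
      have hidx : k - 1 - j - 1 < k - 1 := by omega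
      rw [hsrc _ hidx] at hy
      have hyidx : (k - 1 - j - 1) + 1 = k - (j + 1) := by omega
      rw [hyidx] at hy
      rw [mem_reachP]; right
      by_cases hc : j + 1 ≤ k / 2
      · exact ⟨j + 1, List.mem_range'_1.mpr ⟨by omega, by omega⟩, Or.inl ⟨x, hx, y, hy, hop⟩⟩
      · refine ⟨k - (j + 1), List.mem_range'_1.mpr ⟨by omega, by omega⟩, Or.inr ?_⟩
        have hkk : k - (k - (j + 1)) = j + 1 := by omega
        rw [hkk]
        exact ⟨x, hx, y, hy, hop⟩
  · rw [mem_reachP]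
    rintro (hb | ⟨a, ham, hcase⟩)
    · left
      exact (mem_insert_empty v _).mpr hb
    · right
      have ha := List.mem_range'_1.mp ham
      rcases hcase with ⟨x, hx, y, hy, hop⟩ | ⟨x, hx, y, hy, hop⟩
      · refine ⟨a - 1, List.mem_range.mpr (by omega), x, ?_, y, ?_, hop⟩
        · rw [hsrc (a - 1) (by omega)]
          have h' : (a - 1) + 1 = a := by omega
          rw [h']; exact hx
        · rw [hsrc (k - 1 - (a - 1) - 1) (by omega)]
          have h' : (k - 1 - (a - 1) - 1) + 1 = k - a := by omega
          rw [h']; exact hy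
      · refine ⟨k - a - 1, List.mem_range.mpr (by omega), x, ?_, y, ?_, hop⟩
        · rw [hsrc (k - a - 1) (by omega)]
          have h' : (k - a - 1) + 1 = k - a := by omega
          rw [h']; exact hx
        · rw [hsrc (k - 1 - (k - a - 1) - 1) (by omega)]
          have h' : (k - 1 - (k - a - 1) - 1) + 1 = a := by omega
          rw [h']; exact hy

-- ---- port B computes reachP: the memo only ever caches reachable sets ----

def GoodM (N : Int) (memo : PySem.Dict Nat (Std.HashSet Int)) : Prop :=
  ∀ j s, memo.get? j = some s → ∀ v, (v ∈ s ↔ v ∈ reachP N j)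

lemma goodM_empty (N : Int) : GoodM N PySem.Dict.empty := by
  intro j s h
  simp [PySem.Dict.get?_empty] at h

lemma reachB_sound (N : Int) : ∀ k (memo : PySem.Dict Nat (Std.HashSet Int)), GoodM N memo →
    GoodM N (reachB N k memo).2 ∧ ∀ v, (v ∈ (reachB N k memo).1 ↔ v ∈ reachP N k) := by
  intro k
  induction k using Nat.strong_induction_on with
  | _ k IH =>
  intro memo hm
  rw [reachB]
  cases hget : memo.get? k with
  | some s =>
    exact ⟨hm, fun v => hm k s hget v⟩
  | none =>
    have hfold : ∀ (l : List {x // x ∈ List.range' 1 (k / 2)})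
        (p : Std.HashSet Int × PySem.Dict Nat (Std.HashSet Int)), GoodM N p.2 →
        GoodM N (l.foldl
          (fun p a =>
            let lo := reachB N a.1 p.2
            let hi := reachB N (k - a.1) lo.2
            (addOps (addOps p.1 lo.1 hi.1) hi.1 lo.1, hi.2)) p).2 ∧
        ∀ v, (v ∈ (l.foldl
          (fun p a =>
            let lo := reachB N a.1 p.2
            let hi := reachB N (k - a.1) lo.2
            (addOps (addOps p.1 lo.1 hi.1) hi.1 lo.1, hi.2)) p).1 ↔
          v ∈ p.1 ∨ ∃ a ∈ l,
            (∃ x ∈ reachP N a.1, ∃ y ∈ reachP N (k - a.1), v ∈ opsL x y) ∨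
            (∃ x ∈ reachP N (k - a.1), ∃ y ∈ reachP N a.1, v ∈ opsL x y)) := by
      intro l
      induction l with
      | nil =>
        intro p hp
        refine ⟨hp, fun v => ?_⟩
        rw [List.foldl_nil]
        constructor
        · exact Or.inl
        · rintro (h | ⟨a, ha, -⟩)
          · exact h
          · exact absurd ha List.not_mem_nil
      | cons e l ihl =>
        intro p hp
        have he := List.mem_range'_1.mp e.2
        obtain ⟨hg1, hm1⟩ := IH e.1 (by omega) p.2 hp
        obtain ⟨hg2, hm2⟩ := IH (k - e.1) (by omega) (reachB N e.1 p.2).2 hg1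
        rw [List.foldl_cons]
        obtain ⟨hgout, hmout⟩ := ihl
          ((addOps (addOps p.1 (reachB N e.1 p.2).1 (reachB N (k - e.1) (reachB N e.1 p.2).2).1)
              (reachB N (k - e.1) (reachB N e.1 p.2).2).1 (reachB N e.1 p.2).1,
            (reachB N (k - e.1) (reachB N e.1 p.2).2).2)) hg2
        refine ⟨hgout, fun v => ?_⟩
        rw [hmout v]
        simp only [mem_addOps, List.exists_mem_cons_iff]
        constructor
        · rintro (((hp0 | ⟨x, hx, y, hy, hop⟩) | ⟨x, hx, y, hy, hop⟩) | hrest)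
          · exact Or.inl hp0
          · exact Or.inr (Or.inl (Or.inl ⟨x, (hm1 x).mp hx, y, (hm2 y).mp hy, hop⟩))
          · exact Or.inr (Or.inl (Or.inr ⟨x, (hm2 x).mp hx, y, (hm1 y).mp hy, hop⟩))
          · exact Or.inr (Or.inr hrest)
        · rintro (hp0 | ((⟨x, hx, y, hy, hop⟩ | ⟨x, hx, y, hy, hop⟩) | hrest))
          · exact Or.inl (Or.inl (Or.inl hp0))
          · exact Or.inl (Or.inl (Or.inr ⟨x, (hm1 x).mpr hx, y, (hm2 y).mpr hy, hop⟩))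
          · exact Or.inl (Or.inr ⟨x, (hm2 x).mpr hx, y, (hm1 y).mpr hy, hop⟩)
          · exact Or.inr hrest
    obtain ⟨hgr, hmr⟩ := hfold (List.range' 1 (k / 2)).attach
      ((∅ : Std.HashSet Int).insert (pyRepInt N (k : Int)), memo) hm
    have hchar : ∀ v, (v ∈ (((List.range' 1 (k / 2)).attach.foldl
        (fun p a =>
          let lo := reachB N a.1 p.2
          let hi := reachB N (k - a.1) lo.2
          (addOps (addOps p.1 lo.1 hi.1) hi.1 lo.1, hi.2))
        ((∅ : Std.HashSet Int).insert (pyRepInt N (k : Int)), memo)).1) ↔ v ∈ reachP N k) := by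
      intro v
      rw [hmr v, mem_reachP]
      constructor
      · rintro (hb | ⟨⟨a, ha⟩, -, hp⟩)
        · left; exact (mem_insert_empty v _).mp hb
        · exact Or.inr ⟨a, ha, hp⟩
      · rintro (hb | ⟨a, ha, hp⟩)
        · left; exact (mem_insert_empty v _).mpr hb
        · exact Or.inr ⟨⟨a, ha⟩, List.mem_attach _ _, hp⟩
    refine ⟨?_, hchar⟩
    intro j s hj v
    rw [PySem.Dict.get?_insert] at hj
    by_cases hjk : j = k
    · rw [if_pos hjk] at hj
      cases hj
      rw [hjk]
      exact hchar v
    · rw [if_neg hjk] at hj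
      exact hgr j s hj v

-- ---- the answer loops agree ----

lemma run_eq (N number : Int) :
    ∀ m i ans (memo : PySem.Dict Nat (Std.HashSet Int)), i + m = 8 → (m = 0 → ans = -1) → GoodM N memo →
      runA number (List.range' i m) (elemsA N i) ans = findB N number (List.range' (i + 1) m) memo := by
  intro m
  induction m with
  | zero =>
    intro i ans memo _ h0 _
    have hns := h0 rfl
    subst hns
    simp [runA, findB]
  | succ m ih =>
    intro i ans memo h8 _ hmemo
    rw [List.range'_succ, List.range'_succ]
    simp only [runA, findB]
    obtain ⟨hgood, hmem⟩ := reachB_sound N (i + 1) memo hmemo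
    have hmemIff : (number ∈ ((elemsA N i).set i (stepA (elemsA N i) i)).getD i ∅) ↔
        number ∈ reachP N (i + 1) := by
      rw [show (elemsA N i).set i (stepA (elemsA N i) i) = elemsA N (i + 1) from (elemsA_succ N i).symm]
      rw [show (elemsA N (i + 1)).getD i ∅ = finalA N i from by
        rw [elemsA_succ, List.getD_eq_getElem?_getD,
          List.getElem?_set_self (by rw [length_elemsA]; omega)]
        rfl]
      exact bridge N (i + 1) (by omega) (by omega) number
    by_cases hmm : number ∈ reachP N (i + 1)
    · rw [if_pos (hmemIff.mpr hmm), if_pos ((hmem number).mpr hmm)]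
      push_cast
      ring
    · rw [if_neg (fun hc => hmm (hmemIff.mp hc)), if_neg (fun hc => hmm ((hmem number).mp hc))]
      rw [show (elemsA N i).set i (stepA (elemsA N i) i) = elemsA N (i + 1) from (elemsA_succ N i).symm]
      exact ih (i + 1) (-1) (reachB N (i + 1) memo).2 (by omega) (fun _ => rfl) hgood

-- ===== VERDICT (by name: the statement is the Claim_ definition above) =====
theorem solution_spec : Claim_equal_solution := by
  intro N number _ _
  unfold Spec_solution solution solution_alt
  have h := run_eq N number 8 0 0 PySem.Dict.empty (by omega) (by omega) (goodM_empty N)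
  rw [List.range_eq_range']
  exact h

@[simp]
theorem solution_raises : Claim_raises_solution := by
  unfold Claim_raises_solution
  refine ⟨?_, by decide, by decide, ?_⟩
  · intro N number _ hr
    unfold Raises_solution at hr
    unfold Pre_solution
    omega
  · show solution_alt (-1) (-1) = 1
    unfold solution_alt
    rw [show List.range' 1 8 = 1 :: List.range' 2 7 from rfl]
    simp only [findB]
    rw [show reachB (-1) 1 PySem.Dict.empty =
        ((∅ : Std.HashSet Int).insert (pyRepInt (-1) 1),
         (PySem.Dict.empty : PySem.Dict Nat (Std.HashSet Int)).insert 1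
           ((∅ : Std.HashSet Int).insert (pyRepInt (-1) 1))) from by rw [reachB]; rfl]
    rw [if_pos ((mem_insert_empty _ _).mpr (by decide))]
    rfl
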